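-- pv_equiv track=rewrite | github.com/senapk/arcade | scripts/kgenerate.py | format_tips
-- ===== SOURCE A (Python) =====
-- def format_tips(text, to_invert):
--     """ Adiciona o texto tips e o link do site
--         e inverte a dica
--         to_inverto eh um bool para inverter
--         retorna o texto formatado da dica
--     """
--     saida = ""
--     saida = saida + "\n//@tips"
--     saida = saida + "\n//http://reverse-string.wezo.com.br/pt-BR\n"
--     if to_invert:
--         linhas_dicas = text.split('\n')
--         for linha in reversed(linhas_dicas):
--             linha = linha + '//'
--             linha = linha[::-1] + '\n'
--             saida += linha
--     else:
--         saida += text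
--     return saida
-- ===== SOURCE B (Python) =====
-- def format_tips(text, to_invert):
--     header = "\n//@tips\n//http://reverse-string.wezo.com.br/pt-BR\n"
--     if not to_invert:
--         return header + text
--     out = [header, '//']
--     for c in reversed(text):
--         out.append('\n//' if c == '\n' else c)
--     out.append('\n')
--     return ''.join(out)
-- ===== Notes on version B (the rewrite author's own statement) =====
-- stated objective: alternative
-- what changed: The invert branch no longer splits the text into lines and reverses/suffixes each line; it does one backward character scan of the whole text, emitting '//' after the leading position and after every newline, using the identity that reversing line order plus each line's characters is one reversal of the whole text.
import Mathlib
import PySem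

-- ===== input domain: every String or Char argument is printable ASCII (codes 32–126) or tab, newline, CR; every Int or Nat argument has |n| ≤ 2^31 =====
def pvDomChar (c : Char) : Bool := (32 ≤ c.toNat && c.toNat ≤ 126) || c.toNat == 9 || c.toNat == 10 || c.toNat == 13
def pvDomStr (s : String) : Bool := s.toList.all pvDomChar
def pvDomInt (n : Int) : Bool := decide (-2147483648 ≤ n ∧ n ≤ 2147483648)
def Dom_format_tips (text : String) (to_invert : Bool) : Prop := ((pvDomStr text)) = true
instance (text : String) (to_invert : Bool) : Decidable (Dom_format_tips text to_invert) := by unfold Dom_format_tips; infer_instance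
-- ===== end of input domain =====

-- B replaces A's split-into-lines + reversed per-line loop by a single backward character
-- scan of the whole text, emitting '//' at the start and after every newline (objective: alternative).

-- ===== PORT A =====
def format_tips (text : String) (to_invert : Bool) : String :=
  -- saida = "" + "\n//@tips" + "\n//http://reverse-string.wezo.com.br/pt-BR\n"
  let saida : List Char := ([] : List Char) ++ "\n//@tips".toList
    ++ "\n//http://reverse-string.wezo.com.br/pt-BR\n".toList
  if to_invert then
    -- linhas_dicas = text.split('\n')  (sep nonempty, so split never raises)
    let linhas_dicas : List (List Char) := PySem.Chars.splitOn text.toList "\n".toList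
    -- for linha in reversed(linhas_dicas): saida += (linha + '//')[::-1] + '\n'
    let out := linhas_dicas.reverse.foldl (fun acc linha =>
      let linha₁ := linha ++ "//".toList
      let linha₂ := ((PySem.Chars.slice? linha₁ none none (-1)).getD []) ++ "\n".toList
      acc ++ linha₂) saida
    String.ofList out
  else
    String.ofList (saida ++ text.toList)

-- ===== PORT B =====
def format_tips_alt (text : String) (to_invert : Bool) : String :=
  let header : List Char := "\n//@tips\n//http://reverse-string.wezo.com.br/pt-BR\n".toList
  if !to_invert then
    String.ofList (header ++ text.toList)
  else
    -- out = [header, '//']; for c in reversed(text): out.append('\n//' if c=='\n' else c); out.append('\n')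
    let out := text.toList.reverse.foldl
      (fun acc c => acc ++ (if c = '\n' then ['\n', '/', '/'] else [c]))
      (header ++ ['/', '/'])
    String.ofList (out ++ ['\n'])

-- ===== PRECONDITION & SPEC =====
def Spec_format_tips (text : String) (to_invert : Bool) (out : String) : Prop := out = format_tips_alt text to_invert
instance (text : String) (to_invert : Bool) (out : String) : Decidable (Spec_format_tips text to_invert out) := by unfold Spec_format_tips; infer_instance

-- ===== CLAIM =====
def Claim_equal_format_tips : Prop := ∀ (text : String) (to_invert : Bool), Dom_format_tips text to_invert → Spec_format_tips text to_invert (format_tips text to_invert)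

-- ===== LEMMAS AND PROOFS =====

-- natural structural recursion mirroring splitOn with sep = "\n"
def pvParts : List Char → List Char × List (List Char)
  | [] => ([], [])
  | c :: t =>
    let p := pvParts t
    if c = '\n' then ([], p.1 :: p.2) else (c :: p.1, p.2)

-- each char of the text mapped to its contribution (forward direction)
def pvBlk (c : Char) : List Char := if c = '\n' then ['/', '/', '\n'] else [c]

def pvJoin : List (List Char) → List Char
  | [] => []
  | [h] => h
  | h :: h₂ :: t => h ++ '/' :: '/' :: '\n' :: pvJoin (h₂ :: t)

theorem pvSplitOn_go_eq (l : List Char) : ∀ (fuel : Nat) (cur : List Char) (acc : List (List Char)),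
    l.length ≤ fuel →
    PySem.Chars.splitOn.go ['\n'] fuel l cur acc
      = acc.reverse ++ (cur.reverse ++ (pvParts l).1) :: (pvParts l).2 := by
  induction l with
  | nil =>
    intro fuel cur acc _
    cases fuel <;> rw [PySem.Chars.splitOn.go.eq_def] <;> simp [pvParts]
  | cons c t ih =>
    intro fuel cur acc h
    cases fuel with
    | zero => simp at h
    | succ f =>
      rw [PySem.Chars.splitOn.go.eq_def]
      by_cases hc : c = '\n'
      · subst hc
        simp only [List.isPrefixOf, List.length_cons] at *
        simp only [beq_self_eq_true, Bool.and_self, if_true,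
          List.length_nil, List.drop_succ_cons, List.drop_zero]
        rw [ih f [] (cur.reverse :: acc) (by omega)]
        simp [pvParts]
      · simp only [List.isPrefixOf, Bool.and_true,
          beq_iff_eq, Ne.symm hc, if_false]
        rw [ih f (c :: cur) acc (by simp at h; omega)]
        simp [pvParts, hc]

theorem pvSplitOn_eq (cs : List Char) :
    PySem.Chars.splitOn cs ['\n'] = (pvParts cs).1 :: (pvParts cs).2 := by
  unfold PySem.Chars.splitOn
  rw [pvSplitOn_go_eq cs (cs.length + 1) [] [] (by omega)]
  simp

theorem pvBlk_eq_join (cs : List Char) :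
    cs.flatMap pvBlk = pvJoin ((pvParts cs).1 :: (pvParts cs).2) := by
  induction cs with
  | nil => simp [pvParts, pvJoin]
  | cons c t ih =>
    by_cases hc : c = '\n'
    · subst hc
      simp [pvBlk, pvParts, pvJoin, ih]
    · simp only [List.flatMap_cons, pvBlk, if_neg hc, pvParts, ih]
      cases h : (pvParts t).2 with
      | nil => simp [pvJoin]
      | cons a r => simp [pvJoin]

theorem pvFold_join (h : List Char) (t : List (List Char)) :
    (((h :: t).reverse.map (fun l => (l ++ ['/', '/']).reverse ++ ['\n'])).flatten)
      = '/' :: '/' :: (pvJoin (h :: t)).reverse ++ ['\n'] := by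
  induction t generalizing h with
  | nil => simp [pvJoin]
  | cons h₂ t₂ ih =>
    have : (h :: h₂ :: t₂).reverse = (h₂ :: t₂).reverse ++ [h] := by simp
    rw [this, List.map_append, List.flatten_append, ih h₂]
    simp [pvJoin]

-- ===== VERDICT =====
set_option maxHeartbeats 1000000 in
theorem format_tips_spec : Claim_equal_format_tips := by
  unfold Claim_equal_format_tips Spec_format_tips
  intro text to_invert _
  cases to_invert with
  | false =>
    rw [format_tips, format_tips_alt]
    have hhdr : ("\n//@tips\n//http://reverse-string.wezo.com.br/pt-BR\n".toList : List Char)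
        = ([] : List Char) ++ "\n//@tips".toList ++ "\n//http://reverse-string.wezo.com.br/pt-BR\n".toList := by decide
    simp [hhdr]
  | true =>
    rw [format_tips, format_tips_alt]
    simp only [Bool.not_true, if_true, Bool.false_eq_true, if_false]
    congr 1
    have hsep : ("\n".toList : List Char) = ['\n'] := by decide
    have hsl : ("//".toList : List Char) = ['/', '/'] := by decide
    have hslice : ∀ xs : List Char,
        (PySem.Chars.slice? xs none none (-1)).getD [] = xs.reverse := by
      intro xs
      rw [PySem.Chars.slice?_eq_listSlice?, PySem.List.slice?_none_none_neg_one]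
      rfl
    simp only [hsep, hsl, hslice, pvSplitOn_eq]
    rw [PySem.List.foldl_append_eq_flatMap, List.flatMap_def, pvFold_join]
    rw [PySem.List.foldl_append_eq_flatMap]
    have hB : text.toList.reverse.flatMap
        (fun c => if c = '\n' then ['\n', '/', '/'] else [c])
        = (text.toList.flatMap pvBlk).reverse := by
      rw [List.reverse_flatMap]
      refine List.flatMap_congr (fun c _ => ?_)
      by_cases hc : c = '\n' <;> simp [pvBlk, hc]
    rw [hB, pvBlk_eq_join]
    have hhdr : ("\n//@tips\n//http://reverse-string.wezo.com.br/pt-BR\n".toList : List Char)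
        = ([] : List Char) ++ "\n//@tips".toList ++ "\n//http://reverse-string.wezo.com.br/pt-BR\n".toList := by decide
    rw [hhdr]
    simp
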